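-- pv_equiv track=rewrite | github.com/kkeogh2001/CA117 | Code/password_012.py | dog
-- ===== SOURCE A (Python) =====
-- def dog(s):
--     ok = 0
--     okk = 0
--     nice = 0
--     pog = 0
--     for element in s:
--         if element.isdigit():
--             ok = 1
--         elif element.isupper():
--             okk = 1
--         elif element.islower():
--             nice = 1
--         else:
--             pog = 1
--     return pog + nice + okk + ok
-- ===== SOURCE B (Python) =====
-- def dog(s):
--     has_digit = any(c.isdigit() for c in s)
--     has_upper = any(c.isupper() for c in s)
--     has_lower = any(c.islower() for c in s)
--     has_other = any(not (c.isdigit() or c.isupper() or c.islower()) for c in s)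
--     return has_digit + has_upper + has_lower + has_other
-- ===== Notes on version B (the rewrite author's own statement) =====
-- stated objective: alternative
-- what changed: Replaces the single fused loop over four mutable 0/1 flags by four independent any(...) presence scans, one per category, summed as booleans; correctness relies on the mutual exclusivity of digit/upper/lower so each scan matches A's elif chain.
import Mathlib
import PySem

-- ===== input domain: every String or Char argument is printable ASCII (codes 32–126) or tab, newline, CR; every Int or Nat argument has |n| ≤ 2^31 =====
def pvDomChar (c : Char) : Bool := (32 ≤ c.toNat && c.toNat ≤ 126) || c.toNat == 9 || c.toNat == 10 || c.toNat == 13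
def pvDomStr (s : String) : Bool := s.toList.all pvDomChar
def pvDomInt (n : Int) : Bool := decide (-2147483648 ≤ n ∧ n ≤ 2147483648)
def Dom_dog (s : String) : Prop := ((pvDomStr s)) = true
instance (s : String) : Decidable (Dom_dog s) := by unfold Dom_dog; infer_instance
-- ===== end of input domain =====

-- B replaces A's single fused flag-updating loop by four independent per-category
-- presence scans summed as booleans (objective: alternative decomposition, same cost).

-- ===== PORT A =====
-- literal port of A's loop: four 0/1 integer flags updated by an elif chain
def dogLoop : List Char → Int × Int × Int × Int → Int × Int × Int × Int
  | [], st => st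
  | c :: rest, (ok, okk, nice, pog) =>
    if PySem.Chars.isdigit c then dogLoop rest (1, okk, nice, pog)
    else if PySem.Chars.isupper c then dogLoop rest (ok, 1, nice, pog)
    else if PySem.Chars.islower c then dogLoop rest (ok, okk, 1, pog)
    else dogLoop rest (ok, okk, nice, 1)

def dog (s : String) : Int :=
  let st := dogLoop s.toList (0, 0, 0, 0)
  st.2.2.2 + st.2.2.1 + st.2.1 + st.1

-- ===== PORT B =====
def pvB2I (b : Bool) : Int := if b then 1 else 0

def dog_alt (s : String) : Int :=
  let l := s.toList
  pvB2I (l.any PySem.Chars.isdigit) + pvB2I (l.any PySem.Chars.isupper) +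
    pvB2I (l.any PySem.Chars.islower) +
    pvB2I (l.any (fun c => !(PySem.Chars.isdigit c || PySem.Chars.isupper c || PySem.Chars.islower c)))

-- ===== PRECONDITION & SPEC =====
def Spec_dog (s : String) (out : Int) : Prop := out = dog_alt s
instance (s : String) (out : Int) : Decidable (Spec_dog s out) := by unfold Spec_dog; infer_instance

-- ===== CLAIM (what is proved, stated in full; the proofs are below) =====
def Claim_equal_dog : Prop := ∀ (s : String), Dom_dog s → Spec_dog s (dog s)

-- ===== LEMMAS AND PROOFS =====

-- the three character classes are pairwise disjoint (on every Char)
theorem pv_digit_excl (c : Char) (h : PySem.Chars.isdigit c = true) :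
    PySem.Chars.isupper c = false ∧ PySem.Chars.islower c = false := by
  have e : c.val.toNat = c.toNat := rfl
  simp only [PySem.Chars.isdigit, PySem.Chars.isupper, PySem.Chars.islower, Bool.and_eq_true,
    decide_eq_true_eq, Char.le_def, UInt32.le_iff_toNat_le, e,
    show ('0':Char).val.toNat = 48 from rfl, show ('9':Char).val.toNat = 57 from rfl,
    show ('A':Char).val.toNat = 65 from rfl, show ('Z':Char).val.toNat = 90 from rfl,
    show ('a':Char).val.toNat = 97 from rfl, show ('z':Char).val.toNat = 122 from rfl] at *
  refine ⟨?_, ?_⟩ <;> simp <;> intro h2 <;> omega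

theorem pv_upper_excl (c : Char) (h : PySem.Chars.isupper c = true) :
    PySem.Chars.islower c = false := by
  have e : c.val.toNat = c.toNat := rfl
  simp only [PySem.Chars.isupper, PySem.Chars.islower, Bool.and_eq_true,
    decide_eq_true_eq, Char.le_def, UInt32.le_iff_toNat_le, e,
    show ('A':Char).val.toNat = 65 from rfl, show ('Z':Char).val.toNat = 90 from rfl,
    show ('a':Char).val.toNat = 97 from rfl, show ('z':Char).val.toNat = 122 from rfl] at *
  simp; intro h2; omega

-- characterisation of A's loop: each flag ends 1 iff it started 1 or the category occurs
theorem dogLoop_eq (l : List Char) : ∀ (ok okk nice pog : Int),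
    dogLoop l (ok, okk, nice, pog) =
      ((if l.any PySem.Chars.isdigit then 1 else ok),
       (if l.any PySem.Chars.isupper then 1 else okk),
       (if l.any PySem.Chars.islower then 1 else nice),
       (if l.any (fun c => !(PySem.Chars.isdigit c || PySem.Chars.isupper c || PySem.Chars.islower c)) then 1 else pog)) := by
  induction l with
  | nil => intro ok okk nice pog; simp [dogLoop]
  | cons c rest ih =>
    intro ok okk nice pog
    by_cases hd : PySem.Chars.isdigit c = true
    · obtain ⟨hu, hl⟩ := pv_digit_excl c hd
      simp [dogLoop, hd, hu, hl, ih]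
    · by_cases hu : PySem.Chars.isupper c = true
      · have hl := pv_upper_excl c hu
        simp [dogLoop, hd, hu, hl, ih]
      · by_cases hl : PySem.Chars.islower c = true
        · simp [dogLoop, hd, hu, hl, ih]
        · simp [dogLoop, hd, hu, hl, ih]

-- ===== VERDICT (by name: the statement is the Claim_ definition above) =====
theorem dog_spec : Claim_equal_dog := by
  intro s _
  unfold Spec_dog dog dog_alt pvB2I
  rw [dogLoop_eq]
  dsimp only
  split_ifs <;> ring
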